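-- pv_equiv track=rewrite | github.com/alisoufali/diginext_evaluation | question3.py | count_and_perform_both_win_swaps
-- ===== SOURCE A (Python) =====
-- def count_and_perform_both_win_swaps(
--     places_to_values: dict[int, int], values_to_places: dict[int, int]
-- ) -> tuple[int, dict[int, int], dict[int, int]]:
--     both_win_values: set[int] = set()
--     number_both_win_swaps = 0
--     for first_value, first_place in values_to_places.items():
--         if first_value in both_win_values:
--             continue
--         second_value = places_to_values[first_value]
--         second_place = values_to_places[second_value]
--         if first_place == second_value and first_value == second_place:
--             both_win_values.add(first_value)
--             both_win_values.add(second_value)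
--             number_both_win_swaps += 1
--     for value in both_win_values:
--         place = values_to_places[value]
--         del values_to_places[value]
--         del places_to_values[place]
--     return number_both_win_swaps, places_to_values, values_to_places
-- ===== SOURCE B (Python) =====
-- def count_and_perform_both_win_swaps(
--     places_to_values: dict[int, int], values_to_places: dict[int, int]
-- ) -> tuple[int, dict[int, int], dict[int, int]]:
--     matched = [
--         value
--         for value, place in values_to_places.items()
--         if place == places_to_values[value]
--         and value == values_to_places[places_to_values[value]]
--     ]
--     fixed = sum(1 for value in matched if values_to_places[value] == value)
--     number_both_win_swaps = (len(matched) + fixed) // 2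
--     matched_set = set(matched)
--     dead_places = {values_to_places[value] for value in matched}
--     new_places_to_values = {
--         place: value
--         for place, value in places_to_values.items()
--         if place not in dead_places
--     }
--     new_values_to_places = {
--         value: place
--         for value, place in values_to_places.items()
--         if value not in matched_set
--     }
--     return number_both_win_swaps, new_places_to_values, new_values_to_places
-- ===== Notes on version B (the rewrite author's own statement) =====
-- stated objective: alternative
-- what changed: A's stateful two-pass mutation (a skip-set fold accumulating both-win values, then a deletion sweep over both dicts) is replaced by a declarative computation: a comprehension selects all matched values in one filter, the swap count is the closed form (len(matched)+fixed_points)//2, and the two result dicts are rebuilt by comprehensions that filter out the matched keys/places; no mutation, no skip-set, no deletion loop. Equivalence is about the return value: A mutates its argument dicts in place, B leaves them untouched and returns fresh dicts.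
-- outside the precondition, e.g. on count_and_perform_both_win_swaps({1: 2, 2: 3}, {1: 2, 2: 1}): A returns (1, {}, {}), B returns (0, {1: 2}, {2: 1})
import Mathlib
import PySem

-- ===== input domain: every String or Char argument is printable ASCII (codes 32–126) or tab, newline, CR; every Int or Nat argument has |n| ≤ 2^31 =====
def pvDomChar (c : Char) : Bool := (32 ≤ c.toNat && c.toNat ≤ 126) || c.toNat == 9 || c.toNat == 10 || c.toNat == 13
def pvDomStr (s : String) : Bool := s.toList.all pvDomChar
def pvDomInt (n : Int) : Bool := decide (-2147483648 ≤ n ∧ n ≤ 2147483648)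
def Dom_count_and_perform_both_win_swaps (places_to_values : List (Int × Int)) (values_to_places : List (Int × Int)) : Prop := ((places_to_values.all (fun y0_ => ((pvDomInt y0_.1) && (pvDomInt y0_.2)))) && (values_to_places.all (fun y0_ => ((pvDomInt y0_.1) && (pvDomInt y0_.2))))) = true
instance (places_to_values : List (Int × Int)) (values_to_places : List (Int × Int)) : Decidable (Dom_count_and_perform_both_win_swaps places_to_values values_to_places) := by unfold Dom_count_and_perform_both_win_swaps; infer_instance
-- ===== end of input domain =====

-- B replaces A's stateful two-pass mutation (skip-set fold + deletion sweep) by a declarative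
-- computation: one filter selecting all matched values, the closed-form count
-- (len(matched)+fixed)//2, and comprehension-rebuilt dicts (objective: alternative).
-- Return-value equivalence only: the Python A mutates its argument dicts in place, B does not.

-- ===== PORT A =====
-- A-side helper: the body of A's first loop (accumulate both_win set and counter; dicts untouched).
-- Dict lookups are ported with getD 0: exact on Pre_, where every looked-up key is present.
def aSwapStep (P V : PySem.Dict Int Int) (st : PySem.Set Int × Int) (item : Int × Int) :
    PySem.Set Int × Int :=
  if PySem.Set.contains st.1 item.1 then st
  else
    let second_value := P.getD item.1 0
    let second_place := V.getD second_value 0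
    if item.2 = second_value ∧ item.1 = second_place then
      (PySem.Set.add (PySem.Set.add st.1 item.1) second_value, st.2 + 1)
    else st

-- A-side helper: the body of A's second loop (delete one both_win value from both dicts)
def aDelStep (st : PySem.Dict Int Int × PySem.Dict Int Int) (value : Int) :
    PySem.Dict Int Int × PySem.Dict Int Int :=
  let place := st.2.getD value 0
  (st.1.erase place, st.2.erase value)

def count_and_perform_both_win_swaps (places_to_values : List (Int × Int)) (values_to_places : List (Int × Int)) : Int × (List (Int × Int)) × (List (Int × Int)) :=
  let P := PySem.Dict.ofList places_to_values
  let V := PySem.Dict.ofList values_to_places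
  let r := V.items.foldl (aSwapStep P V) (PySem.Set.empty, 0)
  let d := r.1.foldl aDelStep (P, V)
  (r.2, d.1.items, d.2.items)

-- ===== PORT B =====
-- B-side helper: the condition of B's matched-comprehension
-- (place == places_to_values[value] and value == values_to_places[places_to_values[value]];
-- lookups ported with getD 0: exact on Pre_, where every looked-up key is present).
def bCond (P V : PySem.Dict Int Int) (x : Int × Int) : Bool :=
  (x.2 == P.getD x.1 0) && (x.1 == V.getD (P.getD x.1 0) 0)

def count_and_perform_both_win_swaps_alt (places_to_values : List (Int × Int)) (values_to_places : List (Int × Int)) : Int × (List (Int × Int)) × (List (Int × Int)) :=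
  let P := PySem.Dict.ofList places_to_values
  let V := PySem.Dict.ofList values_to_places
  let matched := (V.items.filter (bCond P V)).map Prod.fst
  let fixed : Int := ((matched.filter (fun v => V.getD v 0 == v)).length : Int)
  let number_both_win_swaps := PySem.Int.floordiv ((matched.length : Int) + fixed) 2
  let matched_set := PySem.Set.ofList matched
  let dead_places := PySem.Set.ofList (matched.map (fun v => V.getD v 0))
  let newP := PySem.Dict.ofList (P.items.filter (fun x => !(PySem.Set.contains dead_places x.1)))
  let newV := PySem.Dict.ofList (V.items.filter (fun x => !(PySem.Set.contains matched_set x.1)))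
  (number_both_win_swaps, newP.items, newV.items)

-- ===== PRECONDITION & SPEC =====
-- Pre_ restricts to the function's intended domain: either values_to_places is empty (A's loops do
-- nothing) or the two dicts are duplicate-free mutually inverse permutations whose value set is
-- contained in the key set; outside that domain A's chained lookups generally raise KeyError
-- (and on the non-raising remainder A's skip-set makes its value an artefact of iteration order).
def Pre_count_and_perform_both_win_swaps (places_to_values : List (Int × Int)) (values_to_places : List (Int × Int)) : Prop :=
  values_to_places = [] ∨
  ((places_to_values.map Prod.fst).Nodup ∧ (values_to_places.map Prod.fst).Nodup ∧
   (∀ x ∈ places_to_values, (x.2, x.1) ∈ values_to_places) ∧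
   (∀ x ∈ values_to_places, (x.2, x.1) ∈ places_to_values) ∧
   (∀ x ∈ places_to_values, x.2 ∈ places_to_values.map Prod.fst))
instance (places_to_values : List (Int × Int)) (values_to_places : List (Int × Int)) : Decidable (Pre_count_and_perform_both_win_swaps places_to_values values_to_places) := by unfold Pre_count_and_perform_both_win_swaps; infer_instance

def pvWitness_count_and_perform_both_win_swaps : (List (Int × Int)) × (List (Int × Int)) :=
  ([(1, 2), (2, 1), (3, 3)], [(2, 1), (1, 2), (3, 3)])

def Spec_count_and_perform_both_win_swaps (places_to_values : List (Int × Int)) (values_to_places : List (Int × Int)) (out : Int × (List (Int × Int)) × (List (Int × Int))) : Prop := out = count_and_perform_both_win_swaps_alt places_to_values values_to_places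
instance (places_to_values : List (Int × Int)) (values_to_places : List (Int × Int)) (out : Int × (List (Int × Int)) × (List (Int × Int))) : Decidable (Spec_count_and_perform_both_win_swaps places_to_values values_to_places out) := by unfold Spec_count_and_perform_both_win_swaps; infer_instance

-- ===== CLAIM (what is proved, stated in full; the proofs are below) =====
def Claim_equal_count_and_perform_both_win_swaps : Prop := ∀ (places_to_values : List (Int × Int)) (values_to_places : List (Int × Int)), Dom_count_and_perform_both_win_swaps places_to_values values_to_places → Pre_count_and_perform_both_win_swaps places_to_values values_to_places → Spec_count_and_perform_both_win_swaps places_to_values values_to_places (count_and_perform_both_win_swaps places_to_values values_to_places)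

-- ===== LEMMAS AND PROOFS =====

-- `dict(pairs)` with duplicate-free keys is the pair list itself
lemma items_ofList_of_nodup (l : List (Int × Int)) (h : (l.map Prod.fst).Nodup) :
    (PySem.Dict.ofList l).items = l := by
  have := PySem.Dict.items_foldl_insert_fresh l Prod.fst Prod.snd PySem.Dict.empty
    (fun a _ => by simp [PySem.Dict.contains, PySem.Dict.empty]) h
  simpa [PySem.Dict.ofList, PySem.Dict.update, PySem.Dict.empty] using this

-- removing a list of keys from a dict (proof-only view of A's deletions and B's filters)
def eraseKeys (d : PySem.Dict Int Int) (S : List Int) : PySem.Dict Int Int :=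
  PySem.Dict.mk (d.items.filter (fun x => decide (x.1 ∉ S)))

lemma eraseKeys_nil (d : PySem.Dict Int Int) : eraseKeys d [] = d := by
  simp [eraseKeys]

lemma erase_eraseKeys (d : PySem.Dict Int Int) (S : List Int) (k : Int) :
    (eraseKeys d S).erase k = eraseKeys d (S ++ [k]) := by
  simp only [eraseKeys, PySem.Dict.erase, List.filter_filter]
  congr 1
  apply List.filter_congr
  intro x _
  by_cases h1 : x.1 ∈ S <;> by_cases h2 : x.1 = k <;> simp [h1, h2]

lemma find?_filter_key (l : List (Int × Int)) (S : List Int) (b : Int) (hb : b ∉ S) :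
    (l.filter (fun x => decide (x.1 ∉ S))).find? (fun p => p.1 == b)
      = l.find? (fun p => p.1 == b) := by
  induction l with
  | nil => rfl
  | cons x xs ih =>
    by_cases hxs : x.1 ∈ S
    · rw [List.filter_cons_of_neg (by simp [hxs]),
        List.find?_cons_of_neg (by simp only [beq_iff_eq]; rintro rfl; exact hb hxs), ih]
    · rw [List.filter_cons_of_pos (by simp [hxs])]
      by_cases hx : x.1 = b
      · rw [List.find?_cons_of_pos (by simp [hx]), List.find?_cons_of_pos (by simp [hx])]
      · rw [List.find?_cons_of_neg (by simp [hx]), List.find?_cons_of_neg (by simp [hx]), ih]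

lemma get?_eraseKeys (d : PySem.Dict Int Int) (S : List Int) (b : Int) (hb : b ∉ S) :
    (eraseKeys d S).get? b = d.get? b := by
  simp only [eraseKeys, PySem.Dict.get?]
  rw [find?_filter_key d.items S b hb]

lemma getD_eraseKeys (d : PySem.Dict Int Int) (S : List Int) (b : Int) (hb : b ∉ S) :
    (eraseKeys d S).getD b 0 = d.getD b 0 := by
  simp [PySem.Dict.getD, get?_eraseKeys d S b hb]

-- the structural hypotheses Pre_'s permutation branch gives about the two dicts
def GoodPair (P V : PySem.Dict Int Int) : Prop :=
  P.keys.Nodup ∧ V.keys.Nodup ∧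
  (∀ x ∈ P.items, (x.2, x.1) ∈ V.items) ∧
  (∀ x ∈ V.items, (x.2, x.1) ∈ P.items) ∧
  (∀ x ∈ P.items, x.2 ∈ P.keys)

lemma getD_of_key (d : PySem.Dict Int Int) (k : Int) (hk : k ∈ d.keys) :
    (k, d.getD k 0) ∈ d.items := by
  rcases ho : d.get? k with _ | w
  · exact absurd ((PySem.Dict.get?_eq_none_iff_not_mem_keys d k).mp ho) (by simpa using hk)
  · have := PySem.Dict.mem_items_of_get?_eq_some d ho
    simpa [PySem.Dict.getD, ho] using this

lemma key_facts {P V : PySem.Dict Int Int} (h : GoodPair P V) {v : Int} (hv : v ∈ V.keys) :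
    (v, P.getD v 0) ∈ P.items ∧ (P.getD v 0, v) ∈ V.items ∧
    P.getD v 0 ∈ V.keys ∧ V.getD (P.getD v 0) 0 = v := by
  obtain ⟨hP, hV, hPV, hVP, hcl⟩ := h
  have h1 : (v, V.getD v 0) ∈ V.items := getD_of_key V v hv
  have h2 : (V.getD v 0, v) ∈ P.items := hVP _ h1
  have hvP : v ∈ P.keys := hcl _ h2
  have h3 : (v, P.getD v 0) ∈ P.items := getD_of_key P v hvP
  have h4 : (P.getD v 0, v) ∈ V.items := hPV _ h3
  have h5 : P.getD v 0 ∈ V.keys := PySem.Dict.mem_keys_of_mem_items V h4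
  exact ⟨h3, h4, h5, PySem.Dict.getD_of_mem_items V h4 hV 0⟩

-- invariant carried by A's both_win set
def BWInv (P V : PySem.Dict Int Int) (bw : List Int) : Prop :=
  ∀ b ∈ bw, b ∈ V.keys ∧ V.getD b 0 = P.getD b 0 ∧ P.getD b 0 ∈ bw

-- full characterisation of A's first loop: nodup, the invariant, the counting identity
-- 2*n = |bw| + #fixed(bw), monotonicity of bw, and completeness (every matched item lands in bw)
lemma phase1 {P V : PySem.Dict Int Int} (h : GoodPair P V) :
    ∀ (rest : List (Int × Int)), (∀ x ∈ rest, x ∈ V.items) →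
    ∀ (bw : PySem.Set Int) (n : Int), bw.Nodup → BWInv P V bw →
    2 * n = (bw.length : Int) + ((bw.filter (fun b => V.getD b 0 == b)).length : Int) →
    (List.foldl (aSwapStep P V) (bw, n) rest).1.Nodup
    ∧ BWInv P V (List.foldl (aSwapStep P V) (bw, n) rest).1
    ∧ 2 * (List.foldl (aSwapStep P V) (bw, n) rest).2
        = ((List.foldl (aSwapStep P V) (bw, n) rest).1.length : Int)
          + (((List.foldl (aSwapStep P V) (bw, n) rest).1.filter
              (fun b => V.getD b 0 == b)).length : Int)
    ∧ (∀ b ∈ bw, b ∈ (List.foldl (aSwapStep P V) (bw, n) rest).1)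
    ∧ (∀ x ∈ rest, bCond P V x = true → x.1 ∈ (List.foldl (aSwapStep P V) (bw, n) rest).1) := by
  intro rest
  induction rest with
  | nil =>
    intro _ bw n hnd hinv hcnt
    exact ⟨hnd, hinv, hcnt, fun b hb => hb, fun x hx => absurd hx (List.not_mem_nil)⟩
  | cons item rest ih =>
    intro hmem bw n hnd hinv hcnt
    have hitem : item ∈ V.items := hmem item (by simp)
    have hrest : ∀ x ∈ rest, x ∈ V.items := fun x hx => hmem x (List.mem_cons_of_mem _ hx)
    obtain ⟨v, p⟩ := item
    have hvK : v ∈ V.keys := PySem.Dict.mem_keys_of_mem_items V hitem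
    have hgv : V.getD v 0 = p := PySem.Dict.getD_of_mem_items V hitem h.2.1 0
    obtain ⟨hvfP, hfvV, hfK, hgf⟩ := key_facts h hvK
    -- under GoodPair the loop condition coincides with bCond, and both reduce to p = P.getD v 0
    have hcond : bCond P V (v, p) = decide (p = P.getD v 0) := by
      by_cases hh : p = P.getD v 0 <;> simp [bCond, hgf, hh]
    simp only [List.foldl_cons]
    by_cases hvbw : v ∈ bw
    · have hcA : PySem.Set.contains bw v = true := (PySem.Set.contains_iff bw v).mpr hvbw
      have hA : aSwapStep P V (bw, n) (v, p) = (bw, n) := by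
        simp only [aSwapStep, hcA, if_true]
      rw [hA]
      obtain ⟨c1, c2, c3, c4, c5⟩ := ih hrest bw n hnd hinv hcnt
      refine ⟨c1, c2, c3, c4, ?_⟩
      intro x hx hcx
      rcases List.mem_cons.mp hx with rfl | hx
      · exact c4 v hvbw
      · exact c5 x hx hcx
    · have hcA : PySem.Set.contains bw v = false := by
        rw [← Bool.not_eq_true]; simp [hvbw]
      have hfbw : P.getD v 0 ∉ bw := by
        intro hfb
        obtain ⟨_, heq, hm⟩ := hinv _ hfb
        rw [hgf] at heq
        exact hvbw (heq ▸ hm)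
      by_cases hmatch : p = P.getD v 0
      · have hPf : P.getD (P.getD v 0) 0 = v := by
          have hfvP : (P.getD v 0, v) ∈ P.items := by
            have := h.2.2.2.1 (v, p) hitem
            rwa [hmatch] at this
          exact PySem.Dict.getD_of_mem_items P hfvP h.1 0
        by_cases hfv : P.getD v 0 = v
        · -- fixed point: v swaps with itself
          have hA : aSwapStep P V (bw, n) (v, p) = (bw ++ [v], n + 1) := by
            simp only [aSwapStep, hcA, Bool.false_eq_true, if_false, hgf]
            rw [if_pos ⟨hmatch, trivial⟩, PySem.Set.add_of_not_mem hvbw,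
              PySem.Set.add_of_mem (by simp [hfv])]
          have hnd' : (bw ++ [v]).Nodup :=
            hnd.append (List.nodup_singleton v)
              (fun a ha hb => hvbw ((List.mem_singleton.mp hb) ▸ ha))
          have hinv' : BWInv P V (bw ++ [v]) := by
            intro b hb
            rcases List.mem_append.mp hb with hb | hb
            · obtain ⟨h1, h2, h3⟩ := hinv b hb
              exact ⟨h1, h2, List.mem_append_left _ h3⟩
            · rw [List.mem_singleton] at hb
              subst hb
              exact ⟨hvK, by rw [hgv, hmatch], by simp [hfv]⟩
          have hvfix : (V.getD v 0 == v) = true := by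
            rw [hgv, hmatch, hfv]; simp
          have hcnt' : 2 * (n + 1) = ((bw ++ [v]).length : Int)
              + (((bw ++ [v]).filter (fun b => V.getD b 0 == b)).length : Int) := by
            rw [List.filter_append, List.filter_cons, hvfix]
            simp only [if_pos, List.filter_nil, List.length_append, List.length_cons,
              List.length_nil]
            push_cast
            omega
          rw [hA]
          obtain ⟨c1, c2, c3, c4, c5⟩ := ih hrest (bw ++ [v]) (n + 1) hnd' hinv' hcnt'
          refine ⟨c1, c2, c3, fun b hb => c4 b (List.mem_append_left _ hb), ?_⟩
          intro x hx hcx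
          rcases List.mem_cons.mp hx with rfl | hx
          · exact c4 v (by simp)
          · exact c5 x hx hcx
        · -- genuine two-element pair
          have hA : aSwapStep P V (bw, n) (v, p) = ((bw ++ [v]) ++ [P.getD v 0], n + 1) := by
            simp only [aSwapStep, hcA, Bool.false_eq_true, if_false, hgf]
            rw [if_pos ⟨hmatch, trivial⟩, PySem.Set.add_of_not_mem hvbw,
              PySem.Set.add_of_not_mem (by simp [hfbw, hfv])]
          have hnd1 : (bw ++ [v]).Nodup :=
            hnd.append (List.nodup_singleton v)
              (fun a ha hb => hvbw ((List.mem_singleton.mp hb) ▸ ha))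
          have hnd' : ((bw ++ [v]) ++ [P.getD v 0]).Nodup := by
            refine hnd1.append (List.nodup_singleton _) ?_
            intro a ha hb
            rw [List.mem_singleton] at hb
            subst hb
            rcases List.mem_append.mp ha with ha | ha
            · exact hfbw ha
            · exact hfv (List.mem_singleton.mp ha)
          have hinv' : BWInv P V ((bw ++ [v]) ++ [P.getD v 0]) := by
            intro b hb
            rcases List.mem_append.mp hb with hb | hb
            · rcases List.mem_append.mp hb with hb | hb
              · obtain ⟨h1, h2, h3⟩ := hinv b hb
                exact ⟨h1, h2, List.mem_append_left _ (List.mem_append_left _ h3)⟩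
              · rw [List.mem_singleton] at hb
                subst hb
                exact ⟨hvK, by rw [hgv, hmatch], by simp⟩
            · rw [List.mem_singleton] at hb
              subst hb
              exact ⟨hfK, by rw [hgf, hPf], by simp [hPf]⟩
          have hvnf : (V.getD v 0 == v) = false := by
            rw [hgv, hmatch]
            simpa using hfv
          have hfnf : (V.getD (P.getD v 0) 0 == P.getD v 0) = false := by
            rw [hgf]
            simpa using fun hh => hfv hh.symm
          have hcnt' : 2 * (n + 1) = (((bw ++ [v]) ++ [P.getD v 0]).length : Int)
              + ((((bw ++ [v]) ++ [P.getD v 0]).filter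
                  (fun b => V.getD b 0 == b)).length : Int) := by
            rw [List.filter_append, List.filter_append, List.filter_cons, List.filter_cons,
              hvnf, hfnf]
            simp only [Bool.false_eq_true, if_false, List.filter_nil, List.length_append,
              List.length_cons, List.length_nil]
            push_cast
            omega
          rw [hA]
          obtain ⟨c1, c2, c3, c4, c5⟩ := ih hrest _ (n + 1) hnd' hinv' hcnt'
          refine ⟨c1, c2, c3,
            fun b hb => c4 b (List.mem_append_left _ (List.mem_append_left _ hb)), ?_⟩
          intro x hx hcx
          rcases List.mem_cons.mp hx with rfl | hx
          · exact c4 v (by simp)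
          · exact c5 x hx hcx
      · -- no both-win swap at this value
        have hA : aSwapStep P V (bw, n) (v, p) = (bw, n) := by
          simp only [aSwapStep, hcA, Bool.false_eq_true, if_false]
          rw [if_neg (by rintro ⟨h1, -⟩; exact hmatch h1)]
        rw [hA]
        obtain ⟨c1, c2, c3, c4, c5⟩ := ih hrest bw n hnd hinv hcnt
        refine ⟨c1, c2, c3, c4, ?_⟩
        intro x hx hcx
        rcases List.mem_cons.mp hx with rfl | hx
        · rw [hcond] at hcx
          exact absurd (of_decide_eq_true hcx) hmatch
        · exact c5 x hx hcx

lemma phase2 (P V : PySem.Dict Int Int) :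
    ∀ (todo S T : List Int), todo.Nodup → (∀ b ∈ todo, b ∉ S ∧ b ∈ V.keys) →
    List.foldl aDelStep (eraseKeys P T, eraseKeys V S) todo
      = (eraseKeys P (T ++ todo.map (fun b => V.getD b 0)), eraseKeys V (S ++ todo)) := by
  intro todo
  induction todo with
  | nil => intro S T _ _; simp
  | cons b bs ih =>
    intro S T hnd hm
    obtain ⟨hbS, _⟩ := hm b (by simp)
    have hstep : aDelStep (eraseKeys P T, eraseKeys V S) b
        = (eraseKeys P (T ++ [V.getD b 0]), eraseKeys V (S ++ [b])) := by
      simp only [aDelStep, getD_eraseKeys V S b hbS, erase_eraseKeys]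
    obtain ⟨hbbs, hbsnd⟩ := List.nodup_cons.mp hnd
    have hrec := ih (S ++ [b]) (T ++ [V.getD b 0]) hbsnd (fun b' hb' => by
      refine ⟨?_, (hm b' (List.mem_cons_of_mem _ hb')).2⟩
      simp only [List.mem_append, List.mem_singleton]
      rintro (hS | rfl)
      · exact (hm b' (List.mem_cons_of_mem _ hb')).1 hS
      · exact hbbs hb')
    simp only [List.foldl_cons, hstep, hrec, List.map_cons, List.append_assoc,
      List.singleton_append]

lemma phase2_nil (P V : PySem.Dict Int Int) (todo : List Int)
    (hnd : todo.Nodup) (hkeys : ∀ b ∈ todo, b ∈ V.keys) :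
    List.foldl aDelStep (P, V) todo
      = (eraseKeys P (todo.map (fun b => V.getD b 0)), eraseKeys V todo) := by
  have := phase2 P V todo [] [] hnd (fun b hb => ⟨by simp, hkeys b hb⟩)
  simpa [eraseKeys_nil] using this

-- ===== VERDICT (by name: the statement is the Claim_ definition above) =====
theorem count_and_perform_both_win_swaps_spec : Claim_equal_count_and_perform_both_win_swaps := by
  unfold Claim_equal_count_and_perform_both_win_swaps
  intro p2v v2p _ hpre
  unfold Spec_count_and_perform_both_win_swaps
  rcases hpre with rfl | ⟨hPnd, hVnd, hPV, hVP, hcl⟩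
  · have hVempty : (PySem.Dict.ofList ([] : List (Int × Int))).items = ([] : List (Int × Int)) := rfl
    have hnk : ((PySem.Dict.ofList p2v).items.map Prod.fst).Nodup := by
      simpa [PySem.Dict.keys] using PySem.Dict.nodup_keys_ofList p2v
    have hid := items_ofList_of_nodup (PySem.Dict.ofList p2v).items hnk
    simp only [count_and_perform_both_win_swaps, count_and_perform_both_win_swaps_alt,
      hVempty, List.filter_nil, List.map_nil, List.foldl_nil, List.length_nil, PySem.Set.empty]
    simp [PySem.Set.ofList, PySem.Set.contains, PySem.Int.floordiv, hid]
  · have hPitems := items_ofList_of_nodup p2v hPnd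
    have hVitems := items_ofList_of_nodup v2p hVnd
    simp only [count_and_perform_both_win_swaps, count_and_perform_both_win_swaps_alt]
    set P := PySem.Dict.ofList p2v with hP
    set V := PySem.Dict.ofList v2p with hV
    have hgood : GoodPair P V := by
      refine ⟨?_, ?_, ?_, ?_, ?_⟩ <;>
        simp only [PySem.Dict.keys, hPitems, hVitems] <;>
        first
          | simpa using hPnd
          | simpa using hVnd
          | (intro x hx; first | exact hPV x hx | exact hVP x hx | simpa using hcl x hx)
    have hVkeysNodup : (V.items.map Prod.fst).Nodup := by
      rw [hVitems]; exact hVnd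
    obtain ⟨hnd, hinv, hcnt, -, hcompl⟩ := phase1 hgood V.items (fun x hx => hx)
      PySem.Set.empty 0 List.nodup_nil (fun b hb => absurd hb (List.not_mem_nil)) (by simp)
    set r := List.foldl (aSwapStep P V) (PySem.Set.empty, 0) V.items with hr
    -- B's matched list of values
    set matched := (V.items.filter (bCond P V)).map Prod.fst with hmdef
    -- members of the both_win set are exactly B's matched values
    have hmemiff : ∀ v, v ∈ matched ↔ v ∈ r.1 := by
      intro v
      constructor
      · intro hvm
        obtain ⟨x, hx, rfl⟩ := List.mem_map.mp hvm
        obtain ⟨hx1, hx2⟩ := List.mem_filter.mp hx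
        exact hcompl x hx1 hx2
      · intro hvr
        obtain ⟨hvK, heq, -⟩ := hinv v hvr
        refine List.mem_map.mpr ⟨(v, V.getD v 0), List.mem_filter.mpr ⟨getD_of_key V v hvK, ?_⟩, rfl⟩
        have hgf := (key_facts hgood hvK).2.2.2
        simp [bCond, heq, hgf]
    have hmnd : matched.Nodup :=
      hVkeysNodup.sublist (List.Sublist.map Prod.fst (List.filter_sublist))
    have hperm : List.Perm matched r.1 := (List.perm_ext_iff_of_nodup hmnd hnd).mpr hmemiff
    -- counting: B's closed form equals A's counter
    have hcount : PySem.Int.floordiv ((matched.length : Int)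
        + ((matched.filter (fun v => V.getD v 0 == v)).length : Int)) 2 = r.2 := by
      have hlen : matched.length = r.1.length := hperm.length_eq
      have hflen : (matched.filter (fun v => V.getD v 0 == v)).length
          = (r.1.filter (fun v => V.getD v 0 == v)).length :=
        (hperm.filter _).length_eq
      rw [hlen, hflen, ← hcnt, PySem.Int.floordiv_eq_ediv_of_pos (by omega)]
      omega
    -- the dict results
    have hkeys : ∀ b ∈ r.1, b ∈ V.keys := fun b hb => (hinv b hb).1
    have hdel := phase2_nil P V r.1 hnd hkeys
    -- B's V-filter equals A's eraseKeys V r.1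
    have hVfilt : V.items.filter (fun x => !(PySem.Set.contains (PySem.Set.ofList matched) x.1))
        = (eraseKeys V r.1).items := by
      simp only [eraseKeys]
      apply List.filter_congr
      intro x _
      have : x.1 ∈ PySem.Set.ofList matched ↔ x.1 ∈ r.1 := by
        rw [PySem.Set.mem_ofList]; exact hmemiff x.1
      by_cases hx : x.1 ∈ r.1 <;>
        simp [hx, this]
    -- B's dead-places set has the same members as r.1
    have hdead : ∀ k, k ∈ matched.map (fun v => V.getD v 0) ↔ k ∈ r.1 := by
      intro k
      constructor
      · intro hk
        obtain ⟨b, hb, rfl⟩ := List.mem_map.mp hk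
        obtain ⟨-, heq, hmem⟩ := hinv b ((hmemiff b).mp hb)
        exact heq ▸ hmem
      · intro hk
        obtain ⟨hkV, heq, hmem⟩ := hinv k hk
        refine List.mem_map.mpr ⟨P.getD k 0, (hmemiff _).mpr hmem, ?_⟩
        exact (key_facts hgood hkV).2.2.2
    have hPfilt : P.items.filter
          (fun x => !(PySem.Set.contains (PySem.Set.ofList (matched.map (fun v => V.getD v 0))) x.1))
        = (eraseKeys P (r.1.map (fun b => V.getD b 0))).items := by
      simp only [eraseKeys]
      apply List.filter_congr
      intro x _
      have h1 : x.1 ∈ r.1.map (fun b => V.getD b 0) ↔ x.1 ∈ r.1 := by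
        constructor
        · intro hk
          obtain ⟨b, hb, hbe⟩ := List.mem_map.mp hk
          obtain ⟨-, heq, hmem⟩ := hinv b hb
          rw [← hbe, heq]; exact hmem
        · intro hk
          obtain ⟨hkV, heq, hmem⟩ := hinv x.1 hk
          exact List.mem_map.mpr ⟨P.getD x.1 0, hmem, (key_facts hgood hkV).2.2.2⟩
      by_cases hx : x.1 ∈ r.1 <;>
        simp [PySem.Set.mem_ofList, hdead, hx, h1]
    -- keys of the filtered lists are duplicate-free, so Dict.ofList leaves them alone
    have hPfiltNodup : ((P.items.filter
          (fun x => !(PySem.Set.contains (PySem.Set.ofList (matched.map (fun v => V.getD v 0))) x.1))).map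
          Prod.fst).Nodup := by
      refine List.Nodup.sublist (List.Sublist.map Prod.fst (List.filter_sublist)) ?_
      rw [hPitems]; exact hPnd
    have hVfiltNodup : ((V.items.filter
          (fun x => !(PySem.Set.contains (PySem.Set.ofList matched) x.1))).map Prod.fst).Nodup :=
      hVkeysNodup.sublist (List.Sublist.map Prod.fst (List.filter_sublist))
    rw [hdel]
    refine Prod.ext ?_ (Prod.ext ?_ ?_) <;> simp only
    · exact hcount.symm
    · rw [items_ofList_of_nodup _ hPfiltNodup, hPfilt]
    · rw [items_ofList_of_nodup _ hVfiltNodup, hVfilt]
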